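-- pv_equiv track=rewrite | github.com/mreishus/aoc | 2023/python2023/aoc/day12.py | is_valid_definite_prefix
-- ===== SOURCE A (Python) =====
-- def is_valid_definite_prefix(grid, nums):
--     in_run = False
--     l = 0
--     new_nums_index = 0
--
--     for c in grid:
--         # Stop at the first '?'
--         if c == "?":
--             break
--
--         if c == ".":
--             if in_run:
--                 if new_nums_index < len(nums) and l != nums[new_nums_index]:
--                     return False
--                 new_nums_index += 1
--                 in_run = False
--             l = 0
--         elif c == "#":
--             if not in_run:
--                 in_run = True
--             l += 1
--
--         if in_run and new_nums_index < len(nums) and l > nums[new_nums_index]: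
--             return False
--
--     # potentially valid
--     return True
-- ===== SOURCE B (Python) =====
-- def _check(segs, nums):
--     # segs: '.'-separated pieces of the definite prefix; nums: remaining expected group sizes
--     if not segs:
--         return True
--     seg, rest = segs[0], segs[1:]
--     cnt = seg.count('#')
--     if cnt == 0:
--         return _check(rest, nums)
--     if not rest:  # last piece: run is open (not terminated by '.')
--         return (not nums) or cnt <= nums[0]
--     if not nums:  # runs past the expected groups are accepted unchecked
--         return True
--     return cnt == nums[0] and _check(rest, nums[1:])
--
--
-- def is_valid_definite_prefix(grid, nums):
--     segs = grid.split('?')[0].split('.')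
--     return _check(segs, nums)
-- ===== Notes on version B (the rewrite author's own statement) =====
-- stated objective: alternative
-- what changed: Replaces A's character-by-character state machine (in_run/l/index with mid-run early exits) by a split-based decomposition: take the prefix before the first '?' via split('?')[0], split it on '.', count '#' per segment, and check the segments against nums in one scan (closed segment must equal nums[k], the final open segment need only not exceed it, segments past nums are unchecked).
import Mathlib
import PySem

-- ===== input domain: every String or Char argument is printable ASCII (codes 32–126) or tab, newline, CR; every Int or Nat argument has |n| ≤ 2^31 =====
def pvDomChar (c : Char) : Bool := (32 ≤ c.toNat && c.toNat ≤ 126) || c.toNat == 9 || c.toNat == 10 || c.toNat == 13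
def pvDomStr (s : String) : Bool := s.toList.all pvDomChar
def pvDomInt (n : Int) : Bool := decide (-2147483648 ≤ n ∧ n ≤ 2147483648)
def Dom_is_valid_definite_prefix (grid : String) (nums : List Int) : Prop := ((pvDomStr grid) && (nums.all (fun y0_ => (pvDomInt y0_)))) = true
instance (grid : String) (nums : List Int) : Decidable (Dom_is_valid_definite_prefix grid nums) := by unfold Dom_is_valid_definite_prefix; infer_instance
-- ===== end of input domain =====

-- B replaces A's character-level in_run/length/index state machine by a split-based pass:
-- split the definite prefix (before the first '?') on '.', count '#' per segment, and check
-- those counts against nums in one scan (same return value; alternative decomposition).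


-- ===== PORT A =====
-- the for-loop of A: state (inRun, l, idx); early 'return False' as literal 'false'
def aLoop (nums : List Int) : List Char → Bool → Int → Int → Bool
  | [], _, _, _ => true
  | c :: rest, inRun, l, idx =>
    if c = '?' then true                      -- break, then 'return True'
    else if c = '.' then
      (if inRun then
        (if decide (idx < (nums.length : Int)) && decide (l ≠ PySem.List.pyGetD nums idx 0) then false
         else aLoop nums rest false 0 (idx + 1))   -- pyGetD is exact: guarded by idx < len(nums)
       else aLoop nums rest inRun 0 idx)
    else if c = '#' then
      -- after 'in_run = True; l += 1' the trailing 'if in_run and …' check runs with in_run = True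
      (if decide (idx < (nums.length : Int)) && decide (PySem.List.pyGetD nums idx 0 < l + 1) then false
       else aLoop nums rest true (l + 1) idx)
    else
      -- other characters: state unchanged, then the trailing 'if in_run and …' check
      (if inRun && decide (idx < (nums.length : Int)) && decide (PySem.List.pyGetD nums idx 0 < l) then false
       else aLoop nums rest inRun l idx)

def is_valid_definite_prefix (grid : String) (nums : List Int) : Bool :=
  aLoop nums grid.toList false 0 0

-- ===== PORT B =====
-- the while-loop of Source B over the segments, k = index into nums
def bGo (nums : List Int) : List (List Char) → Int → Bool
  | [], _ => true
  | seg :: rest, k =>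
    let cnt : Int := (PySem.Chars.count seg ['#'] : Int)
    if cnt = 0 then bGo nums rest k
    else if rest = [] then
      (decide ((nums.length : Int) ≤ k) || decide (cnt ≤ PySem.List.pyGetD nums k 0))  -- guarded: k < len(nums)
    else if decide ((nums.length : Int) ≤ k) then true
    else if cnt ≠ PySem.List.pyGetD nums k 0 then false
    else bGo nums rest (k + 1)

def is_valid_definite_prefix_alt (grid : String) (nums : List Int) : Bool :=
  -- grid.split('?')[0].split('.'); split('?') is never empty, so [0] is headD
  let pre := (PySem.Chars.splitOn grid.toList ['?']).headD []
  let segs := PySem.Chars.splitOn pre ['.']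
  bGo nums segs 0

-- ===== PRECONDITION & SPEC =====
def Spec_is_valid_definite_prefix (grid : String) (nums : List Int) (out : Bool) : Prop := out = is_valid_definite_prefix_alt grid nums
instance (grid : String) (nums : List Int) (out : Bool) : Decidable (Spec_is_valid_definite_prefix grid nums out) := by unfold Spec_is_valid_definite_prefix; infer_instance

-- ===== CLAIM (what is proved, stated in full; the proofs are below) =====
def Claim_equal_is_valid_definite_prefix : Prop := ∀ (grid : String) (nums : List Int), Dom_is_valid_definite_prefix grid nums → Spec_is_valid_definite_prefix grid nums (is_valid_definite_prefix grid nums)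

-- ===== LEMMAS AND PROOFS =====

-- simple single-separator split: (first piece, later pieces)
def mySplit (d : Char) : List Char → List Char × List (List Char)
  | [] => ([], [])
  | c :: cs =>
    let p := mySplit d cs
    if c = d then ([], p.1 :: p.2) else (c :: p.1, p.2)

theorem mySplit_fst (d : Char) (cs : List Char) : (mySplit d cs).1 = cs.takeWhile (· ≠ d) := by
  induction cs with
  | nil => rfl
  | cons c cs ih =>
    by_cases h : c = d <;> simp [mySplit, List.takeWhile, h, ih]

theorem splitOn_go_single (d : Char) :
    ∀ (fuel : Nat) (l cur : List Char) (acc : List (List Char)), l.length < fuel →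
      PySem.Chars.splitOn.go [d] fuel l cur acc
        = acc.reverse ++ (cur.reverse ++ (mySplit d l).1) :: (mySplit d l).2 := by
  intro fuel
  induction fuel with
  | zero => intro l cur acc h; omega
  | succ fuel ih =>
    intro l cur acc h
    match l with
    | [] => simp [PySem.Chars.splitOn.go, mySplit]
    | c :: rest =>
      by_cases hc : c = d
      · subst hc
        have hpre : [c].isPrefixOf (c :: rest) = true := by simp [List.isPrefixOf]
        rw [PySem.Chars.splitOn.go]
        simp only [hpre, if_true, List.length_cons, List.length_nil, List.drop_succ_cons, List.drop_zero]
        rw [ih rest [] (cur.reverse :: acc) (by simpa using Nat.lt_of_succ_lt_succ h)]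
        simp [mySplit]
      · have hpre : [d].isPrefixOf (c :: rest) = false := by
          simp [List.isPrefixOf]; exact fun hdc => absurd hdc.symm hc
        rw [PySem.Chars.splitOn.go]
        simp only [hpre]
        rw [if_neg (by simp [hpre])]
        rw [ih rest (c :: cur) acc (by simpa using Nat.lt_of_succ_lt_succ h)]
        simp [mySplit, hc]

theorem splitOn_single (d : Char) (l : List Char) :
    PySem.Chars.splitOn l [d] = (mySplit d l).1 :: (mySplit d l).2 := by
  rw [PySem.Chars.splitOn, splitOn_go_single d (l.length + 1) l [] [] (by omega)]
  simp

theorem count_go_single (d : Char) :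
    ∀ (fuel : Nat) (l : List Char) (acc : Nat), l.length ≤ fuel →
      PySem.Chars.count.go [d] fuel l acc = acc + l.count d := by
  intro fuel
  induction fuel with
  | zero =>
    intro l acc h
    have : l = [] := List.length_eq_zero_iff.mp (Nat.le_zero.mp h)
    subst this
    simp [PySem.Chars.count.go]
  | succ fuel ih =>
    intro l acc h
    match l with
    | [] => simp [PySem.Chars.count.go]
    | c :: rest =>
      by_cases hc : c = d
      · subst hc
        have hpre : [c].isPrefixOf (c :: rest) = true := by simp [List.isPrefixOf]
        rw [PySem.Chars.count.go]
        simp only [hpre, if_true, List.length_cons, List.length_nil, List.drop_succ_cons, List.drop_zero]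
        rw [ih rest (acc + 1) (by simpa using Nat.lt_of_succ_lt_succ (Nat.lt_succ_of_le h))]
        simp [List.count_cons]
        omega
      · have hpre : [d].isPrefixOf (c :: rest) = false := by
          simp [List.isPrefixOf]; exact fun hdc => absurd hdc.symm hc
        rw [PySem.Chars.count.go]
        rw [if_neg (by simp [hpre])]
        rw [ih rest acc (by simpa using Nat.lt_of_succ_lt_succ (Nat.lt_succ_of_le h))]
        simp [List.count_cons, hc]

theorem count_single (d : Char) (l : List Char) :
    PySem.Chars.count l [d] = l.count d := by
  rw [PySem.Chars.count]
  simp only [List.isEmpty_cons, Bool.false_eq_true, if_false]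
  simpa using count_go_single d l.length l 0 le_rfl

-- mid-level spec 1: A's scan with in_run folded away (in_run ⟺ 0 < l) and nums by suffix
def scanT : List Char → Int → List Int → Bool
  | [], _, _ => true
  | c :: rest, l, ns =>
    if c = '?' then true
    else if c = '.' then
      (if 0 < l then
        (match ns with
         | [] => scanT rest 0 []
         | n :: t => if l = n then scanT rest 0 t else false)
       else scanT rest 0 ns)
    else if c = '#' then
      (match ns with
       | [] => scanT rest (l + 1) []
       | n :: t => if n < l + 1 then false else scanT rest (l + 1) (n :: t))
    else scanT rest l ns

-- mid-level spec 2: B's segment check with a pending run of l '#'s joined to the first segment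
def chkP : List (List Char) → Int → List Int → Bool
  | [], _, _ => true
  | seg :: rest, l, ns =>
    let cnt : Int := l + (seg.count '#' : Int)
    if cnt = 0 then chkP rest 0 ns
    else
      match rest, ns with
      | [], [] => true
      | [], n :: _ => decide (cnt ≤ n)
      | _ :: _, [] => true
      | _ :: _, n :: t => decide (cnt = n) && chkP rest 0 t

theorem scanT_nil_ns : ∀ (cs : List Char) (l : Int), scanT cs l [] = true := by
  intro cs
  induction cs with
  | nil => intro l; rfl
  | cons c rest ih =>
    intro l
    by_cases h1 : c = '?' <;> by_cases h2 : c = '.' <;> by_cases h3 : c = '#' <;>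
      simp [scanT, h1, h2, h3, ih] <;> intro h <;> exact ih _

theorem chkP_exceed (seg : List Char) (rest : List (List Char)) (l n : Int) (t : List Int)
    (hl : 0 < l) (hn : n < l) : chkP (seg :: rest) l (n :: t) = false := by
  have hcnt : (0:Int) < l + (seg.count '#' : Int) := by positivity
  have hne : ¬ (l + (seg.count '#' : Int) = 0) := by omega
  have hgt : n < l + (seg.count '#' : Int) := by
    have : (0:Int) ≤ (seg.count '#' : Int) := by positivity
    omega
  cases rest with
  | nil => simp [chkP, hne]; omega
  | cons r rs => simp [chkP, hne]; intro h; omega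

theorem pyGetD_at (nums : List Int) (k : Nat) (hk : k < nums.length) :
    PySem.List.pyGetD nums (k : Int) 0 = nums[k] := by
  simp [PySem.List.pyGetD_natCast, List.getD_eq_getElem?_getD, List.getElem?_eq_getElem hk]

theorem aLoop_eq_scanT (nums : List Int) :
    ∀ (cs : List Char) (k : Nat) (l : Int) (inRun : Bool),
      inRun = decide (0 < l) → 0 ≤ l →
      (∀ n, 0 < l → (nums.drop k).head? = some n → l ≤ n) →
      aLoop nums cs inRun l (k : Int) = scanT cs l (nums.drop k) := by
  intro cs
  induction cs with
  | nil => intro k l inRun _ _ _; rfl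
  | cons c rest ih =>
    intro k l inRun hin hl hb
    by_cases hq : c = '?'
    · subst hq; simp [aLoop, scanT]
    · by_cases hd : c = '.'
      · subst hd
        rw [show aLoop nums ('.' :: rest) inRun l (k : Int)
            = (if inRun then
                (if decide ((k : Int) < (nums.length : Int)) && decide (l ≠ PySem.List.pyGetD nums (k : Int) 0) then false
                 else aLoop nums rest false 0 ((k : Int) + 1))
               else aLoop nums rest inRun 0 (k : Int)) from by simp [aLoop]]
        rw [show scanT ('.' :: rest) l (nums.drop k)
            = (if 0 < l then
                (match nums.drop k with
                 | [] => scanT rest 0 []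
                 | n :: t => if l = n then scanT rest 0 t else false)
               else scanT rest 0 (nums.drop k)) from by simp [scanT]]
        by_cases hpos : 0 < l
        · have hrun : inRun = true := by simp [hin, hpos]
          rw [hrun, if_pos rfl, if_pos hpos]
          by_cases hk : k < nums.length
          · have hdrop : nums.drop k = nums[k] :: nums.drop (k + 1) := List.drop_eq_getElem_cons hk
            have hklt : decide ((k : Int) < (nums.length : Int)) = true := by
              simp only [decide_eq_true_eq]; exact_mod_cast hk
            have hcast : (k : Int) + 1 = ((k + 1 : Nat) : Int) := by push_cast; ring
            rw [pyGetD_at nums k hk, hklt, hdrop]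
            by_cases heq : l = nums[k]
            · have hc : (true && decide (l ≠ nums[k])) = false := by simp [heq]
              rw [hc]
              simp only [Bool.false_eq_true, if_false, if_pos heq]
              rw [hcast]
              exact ih (k + 1) 0 false (by simp) le_rfl (by intro n h; omega)
            · have hc : (true && decide (l ≠ nums[k])) = true := by simp [heq]
              rw [hc]
              simp [heq]
          · have hdrop : nums.drop k = [] := List.drop_of_length_le (Nat.le_of_not_lt hk)
            have hdrop1 : nums.drop (k + 1) = [] := List.drop_of_length_le (by omega)
            have hklt : decide ((k : Int) < (nums.length : Int)) = false := by
              simp only [decide_eq_false_iff_not, not_lt]; exact_mod_cast Nat.le_of_not_lt hk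
            have hcast : (k : Int) + 1 = ((k + 1 : Nat) : Int) := by push_cast; ring
            rw [hklt, hdrop]
            simp only [Bool.false_and, Bool.false_eq_true, if_false]
            rw [hcast, ih (k + 1) 0 false (by simp) le_rfl (by intro n h; omega), hdrop1]
        · have hl0 : l = 0 := by omega
          have hrun : inRun = false := by simp [hin, hpos]
          subst hl0
          rw [hrun, if_neg (by simp), if_neg hpos]
          exact ih k 0 false (by simp) le_rfl (by intro n h; omega)
      · by_cases hh : c = '#'
        · subst hh
          rw [show aLoop nums ('#' :: rest) inRun l (k : Int)
              = (if decide ((k : Int) < (nums.length : Int)) && decide (PySem.List.pyGetD nums (k : Int) 0 < l + 1) then false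
                 else aLoop nums rest true (l + 1) (k : Int)) from by simp [aLoop]]
          rw [show scanT ('#' :: rest) l (nums.drop k)
              = (match nums.drop k with
                 | [] => scanT rest (l + 1) []
                 | n :: t => if n < l + 1 then false else scanT rest (l + 1) (n :: t)) from by simp [scanT]]
          by_cases hk : k < nums.length
          · have hdrop : nums.drop k = nums[k] :: nums.drop (k + 1) := List.drop_eq_getElem_cons hk
            have hklt : decide ((k : Int) < (nums.length : Int)) = true := by
              simp only [decide_eq_true_eq]; exact_mod_cast hk
            rw [pyGetD_at nums k hk, hklt, hdrop]
            by_cases hlt : nums[k] < l + 1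
            · simp [hlt]
            · have hc : (true && decide (nums[k] < l + 1)) = false := by simp [hlt]
              rw [hc]
              simp only [Bool.false_eq_true, if_false, if_neg hlt]
              rw [ih k (l + 1) true (by simp; omega) (by omega)
                (by intro n _ hn
                    rw [hdrop] at hn
                    simp only [List.head?_cons, Option.some.injEq] at hn
                    subst hn
                    omega), hdrop]
          · have hdrop : nums.drop k = [] := List.drop_of_length_le (Nat.le_of_not_lt hk)
            have hklt : decide ((k : Int) < (nums.length : Int)) = false := by
              simp only [decide_eq_false_iff_not, not_lt]; exact_mod_cast Nat.le_of_not_lt hk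
            rw [hklt, hdrop]
            simp only [Bool.false_and, Bool.false_eq_true, if_false]
            rw [ih k (l + 1) true (by simp; omega) (by omega)
              (by intro n _ hn; rw [hdrop] at hn; simp at hn), hdrop]
        · rw [show aLoop nums (c :: rest) inRun l (k : Int)
              = (if inRun && decide ((k : Int) < (nums.length : Int)) && decide (PySem.List.pyGetD nums (k : Int) 0 < l) then false
                 else aLoop nums rest inRun l (k : Int)) from by simp [aLoop, hq, hd, hh]]
          rw [show scanT (c :: rest) l (nums.drop k) = scanT rest l (nums.drop k) from by
            simp [scanT, hq, hd, hh]]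
          have hcond : (inRun && decide ((k : Int) < (nums.length : Int))
              && decide (PySem.List.pyGetD nums (k : Int) 0 < l)) = false := by
            by_cases hpos : 0 < l
            · by_cases hk : k < nums.length
              · have hdrop : nums.drop k = nums[k] :: nums.drop (k + 1) := List.drop_eq_getElem_cons hk
                have := hb nums[k] hpos (by rw [hdrop]; rfl)
                rw [pyGetD_at nums k hk]
                simp only [Bool.and_eq_false_iff, decide_eq_false_iff_not, not_lt]
                right; exact this
              · have h1 : decide ((k : Int) < (nums.length : Int)) = false := by
                  simp only [decide_eq_false_iff_not, not_lt]; exact_mod_cast Nat.le_of_not_lt hk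
                rw [h1]
                simp
            · have h1 : inRun = false := by simp [hin, hpos]
              rw [h1]
              simp
          rw [hcond]
          simp only [Bool.false_eq_true, if_false]
          exact ih k l inRun hin hl hb

theorem chkP_count (seg seg' : List Char) (rest : List (List Char)) (l l' : Int) (ns : List Int)
    (h : l + (seg.count '#' : Int) = l' + (seg'.count '#' : Int)) :
    chkP (seg :: rest) l ns = chkP (seg' :: rest) l' ns := by
  simp only [chkP]
  rw [h]

theorem chkP_single_pending (l : Int) (ns : List Int) (hl : 0 ≤ l)
    (hb : ∀ n, 0 < l → ns.head? = some n → l ≤ n) :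
    chkP [[]] l ns = true := by
  by_cases hpos : 0 < l
  · cases ns with
    | nil => simp [chkP]
    | cons n t =>
      have := hb n hpos rfl
      simp [chkP]
      omega
  · have : l = 0 := by omega
    subst this
    simp [chkP]

theorem chkP_nilseg_nil (a : List Char) (b : List (List Char)) (l : Int) (hpos : 0 < l) :
    chkP ([] :: a :: b) l [] = true := by
  simp [chkP, (show ¬ (l = 0) by omega)]

theorem chkP_nilseg_cons (a : List Char) (b : List (List Char)) (l n : Int) (t : List Int)
    (hpos : 0 < l) :
    chkP ([] :: a :: b) l (n :: t) = (decide (l = n) && chkP (a :: b) 0 t) := by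
  simp only [chkP, List.count_nil, Nat.cast_zero, add_zero]
  rw [if_neg (by omega)]

theorem chkP_nilseg_zero (a : List Char) (b : List (List Char)) (ns : List Int) :
    chkP ([] :: a :: b) 0 ns = chkP (a :: b) 0 ns := by
  simp [chkP]

theorem scanT_eq_chkP :
    ∀ (cs : List Char) (l : Int) (ns : List Int), 0 ≤ l →
      (∀ n, 0 < l → ns.head? = some n → l ≤ n) →
      scanT cs l ns
        = chkP ((mySplit '.' (cs.takeWhile (· ≠ '?'))).1 :: (mySplit '.' (cs.takeWhile (· ≠ '?'))).2) l ns := by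
  intro cs
  induction cs with
  | nil =>
    intro l ns hl hb
    rw [List.takeWhile_nil]
    exact (chkP_single_pending l ns hl hb).symm
  | cons c rest ih =>
    intro l ns hl hb
    by_cases hq : c = '?'
    · subst hq
      have htw : List.takeWhile (fun x => decide (x ≠ '?')) ('?' :: rest) = [] := by
        rw [List.takeWhile_cons]; simp
      rw [show scanT ('?' :: rest) l ns = true from by simp [scanT]]
      rw [htw]
      exact (chkP_single_pending l ns hl hb).symm
    · have htw : List.takeWhile (fun x => decide (x ≠ '?')) (c :: rest)
          = c :: List.takeWhile (fun x => decide (x ≠ '?')) rest := by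
        rw [List.takeWhile_cons]; simp [hq]
      by_cases hd : c = '.'
      · subst hd
        rw [htw]
        rw [show mySplit '.' ('.' :: List.takeWhile (fun x => decide (x ≠ '?')) rest)
            = ([], (mySplit '.' (List.takeWhile (fun x => decide (x ≠ '?')) rest)).1
                :: (mySplit '.' (List.takeWhile (fun x => decide (x ≠ '?')) rest)).2) from by
          simp [mySplit]]
        by_cases hpos : 0 < l
        · cases ns with
          | nil =>
            rw [show scanT ('.' :: rest) l [] = scanT rest 0 [] from by simp [scanT, hpos]]
            rw [scanT_nil_ns, chkP_nilseg_nil _ _ l hpos]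
          | cons n t =>
            rw [chkP_nilseg_cons _ _ l n t hpos]
            by_cases heq : l = n
            · rw [heq] at hpos ⊢
              rw [show scanT ('.' :: rest) n (n :: t) = scanT rest 0 t from by
                simp [scanT, hpos]]
              rw [ih 0 t le_rfl (by intro m h; omega)]
              simp
            · rw [show scanT ('.' :: rest) l (n :: t) = false from by
                simp [scanT, hpos, heq]]
              simp [heq]
        · have hl0 : l = 0 := by omega
          subst hl0
          rw [show scanT ('.' :: rest) 0 ns = scanT rest 0 ns from by simp [scanT]]
          rw [chkP_nilseg_zero]
          exact ih 0 ns le_rfl (by intro m h; omega)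
      · by_cases hh : c = '#'
        · subst hh
          rw [htw]
          rw [show mySplit '.' ('#' :: List.takeWhile (fun x => decide (x ≠ '?')) rest)
              = ('#' :: (mySplit '.' (List.takeWhile (fun x => decide (x ≠ '?')) rest)).1,
                 (mySplit '.' (List.takeWhile (fun x => decide (x ≠ '?')) rest)).2) from by
            simp [mySplit]]
          rw [chkP_count ('#' :: (mySplit '.' (List.takeWhile (fun x => decide (x ≠ '?')) rest)).1)
            (mySplit '.' (List.takeWhile (fun x => decide (x ≠ '?')) rest)).1 _ l (l + 1) ns
            (by simp [List.count_cons]; push_cast; ring)]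
          cases ns with
          | nil =>
            rw [show scanT ('#' :: rest) l [] = scanT rest (l + 1) [] from by simp [scanT]]
            exact ih (l + 1) [] (by omega) (by intro m _ h; exact absurd h (by simp))
          | cons n t =>
            by_cases hlt : n < l + 1
            · rw [show scanT ('#' :: rest) l (n :: t) = false from by simp [scanT, hlt]]
              rw [chkP_exceed _ _ _ _ _ (by omega) hlt]
            · rw [show scanT ('#' :: rest) l (n :: t) = scanT rest (l + 1) (n :: t) from by
                simp [scanT, hlt]]
              exact ih (l + 1) (n :: t) (by omega)
                (by intro m _ h
                    simp only [List.head?_cons, Option.some.injEq] at h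
                    subst h
                    omega)
        · rw [htw]
          rw [show mySplit '.' (c :: List.takeWhile (fun x => decide (x ≠ '?')) rest)
              = (c :: (mySplit '.' (List.takeWhile (fun x => decide (x ≠ '?')) rest)).1,
                 (mySplit '.' (List.takeWhile (fun x => decide (x ≠ '?')) rest)).2) from by
            simp [mySplit, hd]]
          rw [show scanT (c :: rest) l ns = scanT rest l ns from by simp [scanT, hq, hd, hh]]
          rw [chkP_count (c :: (mySplit '.' (List.takeWhile (fun x => decide (x ≠ '?')) rest)).1)
            (mySplit '.' (List.takeWhile (fun x => decide (x ≠ '?')) rest)).1 _ l l ns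
            (by simp [List.count_cons, hh])]
          exact ih l ns hl hb

theorem chkP_eq_bGo (nums : List Int) :
    ∀ (segs : List (List Char)) (k : Nat),
      chkP segs 0 (nums.drop k) = bGo nums segs (k : Int) := by
  intro segs
  induction segs with
  | nil => intro k; rfl
  | cons seg rest ih =>
    intro k
    have hcnt : ((PySem.Chars.count seg ['#'] : Nat) : Int) = ((seg.count '#' : Nat) : Int) := by
      rw [count_single]
    by_cases h0 : ((seg.count '#' : Nat) : Int) = 0
    · rw [show bGo nums (seg :: rest) (k : Int) = bGo nums rest (k : Int) from by
        simp only [bGo]; rw [hcnt, if_pos h0]]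
      rw [show chkP (seg :: rest) 0 (nums.drop k) = chkP rest 0 (nums.drop k) from by
        simp only [chkP, zero_add]; rw [if_pos h0]]
      exact ih k
    · by_cases hk : k < nums.length
      · have hdrop : nums.drop k = nums[k] :: nums.drop (k + 1) := List.drop_eq_getElem_cons hk
        have hle : ¬ ((nums.length : Int) ≤ (k : Int)) := by push_cast; omega
        have hlef : decide ((nums.length : Int) ≤ (k : Int)) = false := by
          simp only [decide_eq_false_iff_not]; exact hle
        have hcast : (k : Int) + 1 = ((k + 1 : Nat) : Int) := by push_cast; ring
        cases rest with
        | nil =>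
          rw [show bGo nums [seg] (k : Int)
              = (decide ((nums.length : Int) ≤ (k : Int))
                 || decide (((seg.count '#' : Nat) : Int) ≤ PySem.List.pyGetD nums (k : Int) 0)) from by
            simp only [bGo]; rw [hcnt, if_neg h0]; simp]
          rw [show chkP [seg] 0 (nums.drop k)
              = decide (((seg.count '#' : Nat) : Int) ≤ nums[k]) from by
            rw [hdrop]; simp only [chkP, zero_add]; rw [if_neg h0]]
          rw [pyGetD_at nums k hk, hlef]
          simp
        | cons r rs =>
          rw [show bGo nums (seg :: r :: rs) (k : Int)
              = (if decide ((nums.length : Int) ≤ (k : Int)) = true then true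
                 else if ((seg.count '#' : Nat) : Int) ≠ PySem.List.pyGetD nums (k : Int) 0 then false
                 else bGo nums (r :: rs) ((k : Int) + 1)) from by
            simp only [bGo]; rw [hcnt, if_neg h0, if_neg (by simp : ¬(r :: rs = ([] : List (List Char))))]]
          rw [show chkP (seg :: r :: rs) 0 (nums.drop k)
              = (decide (((seg.count '#' : Nat) : Int) = nums[k]) && chkP (r :: rs) 0 (nums.drop (k + 1))) from by
            rw [hdrop]; simp only [chkP, zero_add]; rw [if_neg h0]]
          rw [pyGetD_at nums k hk, hlef]
          simp only [Bool.false_eq_true, if_false]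
          by_cases heq : ((seg.count '#' : Nat) : Int) = nums[k]
          · rw [if_neg (by simp [heq]), hcast, ← ih (k + 1)]
            simp [heq]
          · rw [if_pos heq]
            simp [heq]
      · have hdrop : nums.drop k = [] := List.drop_of_length_le (Nat.le_of_not_lt hk)
        have hle : decide ((nums.length : Int) ≤ (k : Int)) = true := by
          simp only [decide_eq_true_eq]; push_cast; omega
        cases rest with
        | nil =>
          rw [show bGo nums [seg] (k : Int)
              = (decide ((nums.length : Int) ≤ (k : Int))
                 || decide (((seg.count '#' : Nat) : Int) ≤ PySem.List.pyGetD nums (k : Int) 0)) from by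
            simp only [bGo]; rw [hcnt, if_neg h0]; simp]
          rw [show chkP [seg] 0 (nums.drop k) = true from by
            rw [hdrop]; simp only [chkP, zero_add]; rw [if_neg h0]]
          rw [hle]
          simp
        | cons r rs =>
          rw [show bGo nums (seg :: r :: rs) (k : Int)
              = (if decide ((nums.length : Int) ≤ (k : Int)) = true then true
                 else if ((seg.count '#' : Nat) : Int) ≠ PySem.List.pyGetD nums (k : Int) 0 then false
                 else bGo nums (r :: rs) ((k : Int) + 1)) from by
            simp only [bGo]; rw [hcnt, if_neg h0, if_neg (by simp : ¬(r :: rs = ([] : List (List Char))))]]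
          rw [show chkP (seg :: r :: rs) 0 (nums.drop k) = true from by
            rw [hdrop]; simp only [chkP, zero_add]; rw [if_neg h0]]
          rw [hle]
          simp

-- ===== VERDICT (by name: the statement is the Claim_ definition above) =====
theorem is_valid_definite_prefix_spec : Claim_equal_is_valid_definite_prefix := by
  intro grid nums _
  unfold Spec_is_valid_definite_prefix is_valid_definite_prefix is_valid_definite_prefix_alt
  have h1 := aLoop_eq_scanT nums grid.toList 0 0 false (by simp) le_rfl (by intro n h; omega)
  simp only [Nat.cast_zero, List.drop_zero] at h1
  rw [h1, scanT_eq_chkP grid.toList 0 nums le_rfl (by intro n h; omega)]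
  have h2 := chkP_eq_bGo nums
    ((mySplit '.' (grid.toList.takeWhile (· ≠ '?'))).1 :: (mySplit '.' (grid.toList.takeWhile (· ≠ '?'))).2) 0
  simp only [Nat.cast_zero, List.drop_zero] at h2
  show _ = bGo nums (PySem.Chars.splitOn ((PySem.Chars.splitOn grid.toList ['?']).headD []) ['.']) 0
  rw [splitOn_single '?']
  simp only [List.headD_cons, mySplit_fst]
  rw [splitOn_single '.']
  simp only [mySplit_fst] at h2 ⊢
  exact h2
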